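-- pv_equiv track=rewrite | github.com/ofer2300/aquabrain-dashboard | backend/services/linguist.py | _get_related_terms
-- ===== SOURCE A (Python) =====
-- from typing import Dict, Any, List, Optional, Tuple
--
-- def _get_related_terms(term_key: str) -> List[str]:
--     """Get related engineering terms."""
--     related = []
--     domain_terms = {
--         "fire_protection": ["sprinkler_head", "pressure_loss", "flow_rate", "nfpa_13"],
--         "hvac": ["duct", "diffuser", "cfm"],
--         "clash": ["hard_clash", "soft_clash", "clearance"],
--     }
--
--     for domain, terms in domain_terms.items():
--         if term_key in terms:
--             related = [t for t in terms if t != term_key][:3]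
--             break
--
--     return related
-- ===== SOURCE B (Python) =====
-- from typing import List
--
-- # Flat reverse index: each term maps directly to its pre-filtered,
-- # pre-truncated sibling list (computed once, written out literally).
-- _RELATED_INDEX = {
--     "sprinkler_head": ["pressure_loss", "flow_rate", "nfpa_13"],
--     "pressure_loss": ["sprinkler_head", "flow_rate", "nfpa_13"],
--     "flow_rate": ["sprinkler_head", "pressure_loss", "nfpa_13"],
--     "nfpa_13": ["sprinkler_head", "pressure_loss", "flow_rate"],
--     "duct": ["diffuser", "cfm"],
--     "diffuser": ["duct", "cfm"],
--     "cfm": ["duct", "diffuser"],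
--     "hard_clash": ["soft_clash", "clearance"],
--     "soft_clash": ["hard_clash", "clearance"],
--     "clearance": ["hard_clash", "soft_clash"],
-- }
--
-- def _get_related_terms(term_key: str) -> List[str]:
--     """Get related engineering terms."""
--     return list(_RELATED_INDEX.get(term_key, []))
-- ===== Notes on version B (the rewrite author's own statement) =====
-- stated objective: idiomatic
-- what changed: Replaces the per-call loop over domain lists with membership tests and a filtered/truncated comprehension by a single flat reverse-index dict built once at module scope, so the body is one direct dict lookup.
import Mathlib
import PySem

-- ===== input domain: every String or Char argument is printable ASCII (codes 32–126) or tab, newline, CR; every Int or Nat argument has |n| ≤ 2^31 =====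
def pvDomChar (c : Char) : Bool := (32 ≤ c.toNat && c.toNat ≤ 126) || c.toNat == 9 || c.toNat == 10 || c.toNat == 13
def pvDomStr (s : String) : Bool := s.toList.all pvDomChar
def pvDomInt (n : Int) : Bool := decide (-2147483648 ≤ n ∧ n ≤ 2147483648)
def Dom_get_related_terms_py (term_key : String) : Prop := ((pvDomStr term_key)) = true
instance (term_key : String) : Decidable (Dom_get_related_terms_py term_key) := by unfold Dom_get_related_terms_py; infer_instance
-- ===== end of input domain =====

-- B replaces A's per-call loop over the domain dict by a flat reverse-index
-- dict (term → pre-filtered, pre-truncated sibling list) looked up directly.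

-- ===== PORT A =====
-- the `for domain, terms in …: if term_key in terms: related = …; break` loop
def grtLoopA (term_key : String) : List (String × List String) → List String
  | [] => []
  | (_, terms) :: rest =>
      if terms.contains term_key then
        ((terms.filter (fun t => t != term_key)).take 3)   -- [t for t in terms if t != term_key][:3]
      else grtLoopA term_key rest

def get_related_terms_py (term_key : String) : List String :=
  let domain_terms : List (String × List String) :=
    [("fire_protection", ["sprinkler_head", "pressure_loss", "flow_rate", "nfpa_13"]),
     ("hvac", ["duct", "diffuser", "cfm"]),
     ("clash", ["hard_clash", "soft_clash", "clearance"])]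
  grtLoopA term_key domain_terms

-- ===== PORT B =====
def grtIndexB : PySem.Dict String (List String) :=
  PySem.Dict.mk
  [("sprinkler_head", ["pressure_loss", "flow_rate", "nfpa_13"]),
   ("pressure_loss", ["sprinkler_head", "flow_rate", "nfpa_13"]),
   ("flow_rate", ["sprinkler_head", "pressure_loss", "nfpa_13"]),
   ("nfpa_13", ["sprinkler_head", "pressure_loss", "flow_rate"]),
   ("duct", ["diffuser", "cfm"]),
   ("diffuser", ["duct", "cfm"]),
   ("cfm", ["duct", "diffuser"]),
   ("hard_clash", ["soft_clash", "clearance"]),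
   ("soft_clash", ["hard_clash", "clearance"]),
   ("clearance", ["hard_clash", "soft_clash"])]

def get_related_terms_py_alt (term_key : String) : List String :=
  PySem.Dict.getD grtIndexB term_key []

-- ===== PRECONDITION & SPEC =====
def Spec_get_related_terms_py (term_key : String) (out : List String) : Prop := out = get_related_terms_py_alt term_key
instance (term_key : String) (out : List String) : Decidable (Spec_get_related_terms_py term_key out) := by unfold Spec_get_related_terms_py; infer_instance

-- ===== CLAIM (what is proved, stated in full; the proofs are below) =====
def Claim_equal_get_related_terms_py : Prop := ∀ (term_key : String), Dom_get_related_terms_py term_key → Spec_get_related_terms_py term_key (get_related_terms_py term_key)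

-- ===== LEMMAS AND PROOFS =====

-- ===== VERDICT (by name: the statement is the Claim_ definition above) =====
theorem get_related_terms_py_spec : Claim_equal_get_related_terms_py := by
  intro t _
  show get_related_terms_py t = get_related_terms_py_alt t
  by_cases h1 : t = "sprinkler_head"; · subst h1; rfl
  by_cases h2 : t = "pressure_loss"; · subst h2; rfl
  by_cases h3 : t = "flow_rate"; · subst h3; rfl
  by_cases h4 : t = "nfpa_13"; · subst h4; rfl
  by_cases h5 : t = "duct"; · subst h5; rfl
  by_cases h6 : t = "diffuser"; · subst h6; rfl
  by_cases h7 : t = "cfm"; · subst h7; rfl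
  by_cases h8 : t = "hard_clash"; · subst h8; rfl
  by_cases h9 : t = "soft_clash"; · subst h9; rfl
  by_cases h10 : t = "clearance"; · subst h10; rfl
  have c1 : (["sprinkler_head", "pressure_loss", "flow_rate", "nfpa_13"] : List String).contains t = false := by
    simp [h1, h2, h3, h4]
  have c2 : (["duct", "diffuser", "cfm"] : List String).contains t = false := by
    simp [h5, h6, h7]
  have c3 : (["hard_clash", "soft_clash", "clearance"] : List String).contains t = false := by
    simp [h8, h9, h10]
  simp only [get_related_terms_py, grtLoopA, c1, c2, c3, Bool.false_eq_true, if_false,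
    get_related_terms_py_alt, grtIndexB, PySem.Dict.getD, PySem.Dict.get?_mk_cons,
    beq_iff_eq]
  simp [Ne.symm h1, Ne.symm h2, Ne.symm h3, Ne.symm h4, Ne.symm h5,
        Ne.symm h6, Ne.symm h7, Ne.symm h8, Ne.symm h9, Ne.symm h10, PySem.Dict.get?]
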